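-- pv_equiv track=rewrite | github.com/monawasensei/MassBalance | units.py | compare_content_lists
-- ===== SOURCE A (Python) =====
-- def compare_content_lists(forward, backward):
-- 	checkedList = list()
-- 	degreeOfSeparation = 0
-- 	for entry in forward:
-- 		if entry not in backward and entry not in checkedList:
-- 			degreeOfSeparation += 1
-- 		checkedList.append(entry)
-- 	for entry in backward:
-- 		if entry not in forward and entry not in checkedList:
-- 			degreeOfSeparation += 1
-- 		checkedList.append(entry)
-- 	return degreeOfSeparation
-- ===== SOURCE B (Python) =====
-- def compare_content_lists(forward, backward):
--     uniq_f = []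
--     for x in forward:
--         if x not in uniq_f:
--             uniq_f.append(x)
--     uniq_b = []
--     for x in backward:
--         if x not in uniq_b:
--             uniq_b.append(x)
--     common = len([x for x in uniq_f if x in backward])
--     return len(uniq_f) + len(uniq_b) - 2 * common
-- ===== Notes on version B (the rewrite author's own statement) =====
-- stated objective: alternative
-- what changed: Replaces A's two interleaved not-in-other/not-in-checked scans with building two deduplicated lists and computing |A|+|B|-2|A∩B| by inclusion-exclusion.
import Mathlib
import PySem

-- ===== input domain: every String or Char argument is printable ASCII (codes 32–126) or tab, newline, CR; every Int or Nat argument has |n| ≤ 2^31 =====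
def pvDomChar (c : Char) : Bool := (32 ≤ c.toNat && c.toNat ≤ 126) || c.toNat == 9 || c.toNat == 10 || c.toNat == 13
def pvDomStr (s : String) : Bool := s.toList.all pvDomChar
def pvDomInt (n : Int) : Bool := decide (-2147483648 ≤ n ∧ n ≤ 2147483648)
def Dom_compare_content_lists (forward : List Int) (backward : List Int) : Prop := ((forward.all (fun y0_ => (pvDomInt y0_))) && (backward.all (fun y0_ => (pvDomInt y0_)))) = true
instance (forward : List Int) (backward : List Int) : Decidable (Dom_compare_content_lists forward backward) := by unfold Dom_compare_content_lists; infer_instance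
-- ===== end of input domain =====

-- B replaces A's interleaved not-in-other/not-in-checked scans by building two deduplicated
-- lists and combining their sizes by inclusion-exclusion (alternative decomposition, same cost).

-- ===== PORT A =====
-- state = (checkedList, degreeOfSeparation); the two for-loops are two foldls over that state
def compare_content_lists (forward : List Int) (backward : List Int) : Int :=
  let st1 := forward.foldl
    (fun (st : List Int × Int) entry =>
      (st.1 ++ [entry], if entry ∉ backward ∧ entry ∉ st.1 then st.2 + 1 else st.2))
    ([], 0)
  let st2 := backward.foldl
    (fun (st : List Int × Int) entry =>
      (st.1 ++ [entry], if entry ∉ forward ∧ entry ∉ st.1 then st.2 + 1 else st.2))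
    st1
  st2.2

-- ===== PORT B =====
-- dedup-by-membership loop shared by both lists
def pvUniq (l : List Int) : List Int :=
  l.foldl (fun acc x => if x ∉ acc then acc ++ [x] else acc) []

def compare_content_lists_alt (forward : List Int) (backward : List Int) : Int :=
  ((pvUniq forward).length : Int) + ((pvUniq backward).length : Int)
    - 2 * ((((pvUniq forward).filter (fun x => x ∈ backward)).length : Int))

-- ===== PRECONDITION & SPEC =====
def Spec_compare_content_lists (forward : List Int) (backward : List Int) (out : Int) : Prop := out = compare_content_lists_alt forward backward
instance (forward : List Int) (backward : List Int) (out : Int) : Decidable (Spec_compare_content_lists forward backward out) := by unfold Spec_compare_content_lists; infer_instance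

-- ===== CLAIM (what is proved, stated in full; the proofs are below) =====
def Claim_equal_compare_content_lists : Prop := ∀ (forward : List Int) (backward : List Int), Dom_compare_content_lists forward backward → Spec_compare_content_lists forward backward (compare_content_lists forward backward)

-- ===== LEMMAS AND PROOFS =====

-- Finset step identity used by the A-loop invariant
lemma pv_card_step (x : Int) (A S : Finset Int) :
    ((insert x A) \ S).card = (if x ∈ S then 0 else 1) + (A \ insert x S).card := by
  by_cases hx : x ∈ S
  · simp [hx, Finset.insert_sdiff_of_mem, Finset.insert_eq_self.mpr hx]
  · by_cases hxA : x ∈ A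
    · have h1 : insert x A \ S = A \ S := by
        rw [Finset.insert_eq_self.mpr hxA]
      have h2 : A \ insert x S = (A \ S).erase x := by
        ext y
        simp only [Finset.mem_erase, Finset.mem_sdiff, Finset.mem_insert]
        tauto
      have hmem : x ∈ A \ S := Finset.mem_sdiff.mpr ⟨hxA, hx⟩
      rw [h1, h2, Finset.card_erase_of_mem hmem]
      have hpos : 1 ≤ (A \ S).card := Finset.card_pos.mpr ⟨x, hmem⟩
      simp only [if_neg hx]
      omega
    · have h1 : insert x A \ S = insert x (A \ S) := by
        ext y
        simp only [Finset.mem_insert, Finset.mem_sdiff]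
        constructor
        · rintro ⟨h | h, hns⟩
          · exact Or.inl h
          · exact Or.inr ⟨h, hns⟩
        · rintro (h | ⟨h, hns⟩)
          · exact ⟨Or.inl h, h ▸ hx⟩
          · exact ⟨Or.inr h, hns⟩
      have h2 : A \ insert x S = A \ S := by
        ext y
        simp only [Finset.mem_sdiff, Finset.mem_insert]
        constructor
        · rintro ⟨hy, hns⟩; exact ⟨hy, fun h => hns (Or.inr h)⟩
        · rintro ⟨hy, hns⟩
          refine ⟨hy, ?_⟩
          rintro (he | he)
          · exact hxA (he ▸ hy)
          · exact hns he
      have hxAS : x ∉ A \ S := fun h => hxA (Finset.mem_sdiff.mp h).1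
      rw [h1, h2, Finset.card_insert_of_notMem hxAS]
      simp only [if_neg hx]
      omega

-- invariant of A's loops: final state = (checked ++ l, n + #{distinct new elements of l outside m and checked})
lemma pv_loopA (m : List Int) :
    ∀ (l c : List Int) (n : Int),
      l.foldl (fun (st : List Int × Int) entry =>
          (st.1 ++ [entry], if entry ∉ m ∧ entry ∉ st.1 then st.2 + 1 else st.2)) (c, n)
      = (c ++ l, n + ((l.toFinset \ (m.toFinset ∪ c.toFinset)).card : Int)) := by
  intro l
  induction l with
  | nil => intro c n; simp
  | cons x xs ih =>
    intro c n
    simp only [List.foldl_cons]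
    rw [ih (c ++ [x])]
    simp only [Prod.mk.injEq]
    refine ⟨by simp, ?_⟩
    · have hstep := pv_card_step x xs.toFinset (m.toFinset ∪ c.toFinset)
      have hset : m.toFinset ∪ (c ++ [x]).toFinset = insert x (m.toFinset ∪ c.toFinset) := by
        ext y
        simp only [Finset.mem_union, Finset.mem_insert, List.mem_toFinset, List.mem_append,
          List.mem_singleton]
        tauto
      rw [hset]
      simp only [List.toFinset_cons]
      rw [hstep]
      by_cases hx : x ∈ m.toFinset ∪ c.toFinset
      · have hc : ¬ (x ∉ m ∧ x ∉ c) := by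
          simp only [Finset.mem_union, List.mem_toFinset] at hx; tauto
        simp only [if_neg hc, if_pos hx]
        push_cast
        ring
      · have hc : x ∉ m ∧ x ∉ c := by
          simp only [Finset.mem_union, List.mem_toFinset, not_or] at hx; tauto
        simp only [if_pos hc, if_neg hx]
        push_cast
        ring

-- B's dedup loop: membership and nodup
lemma pv_uniq_aux :
    ∀ (l acc : List Int),
      (l.foldl (fun acc x => if x ∉ acc then acc ++ [x] else acc) acc).toFinset
        = acc.toFinset ∪ l.toFinset ∧
      (acc.Nodup →
        (l.foldl (fun acc x => if x ∉ acc then acc ++ [x] else acc) acc).Nodup) := by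
  intro l
  induction l with
  | nil => intro acc; simp
  | cons x xs ih =>
    intro acc
    simp only [List.foldl_cons]
    by_cases hx : x ∈ acc
    · obtain ⟨h1, h2⟩ := ih acc
      constructor
      · rw [if_neg (not_not_intro hx), h1]
        ext y; simp only [Finset.mem_union, List.mem_toFinset, List.mem_cons]
        constructor
        · tauto
        · rintro (h | h | h)
          · tauto
          · exact Or.inl (h ▸ hx)
          · tauto
      · intro hnd
        rw [if_neg (not_not_intro hx)]
        exact h2 hnd
    · obtain ⟨h1, h2⟩ := ih (acc ++ [x])
      constructor
      · rw [if_pos hx, h1]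
        ext y; simp only [Finset.mem_union, List.mem_toFinset, List.mem_cons, List.mem_append]
        tauto
      · intro hnd
        rw [if_pos hx]
        refine h2 ?_
        rw [List.nodup_append]
        refine ⟨hnd, by simp, ?_⟩
        intro a ha b hb
        simp only [List.mem_singleton] at hb
        intro he
        exact hx (hb ▸ he ▸ ha)

lemma pv_uniq_toFinset (l : List Int) : (pvUniq l).toFinset = l.toFinset := by
  have := (pv_uniq_aux l []).1
  simpa [pvUniq] using this

lemma pv_uniq_nodup (l : List Int) : (pvUniq l).Nodup :=
  (pv_uniq_aux l []).2 (by simp)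

lemma pv_uniq_length (l : List Int) : (pvUniq l).length = l.toFinset.card := by
  rw [← pv_uniq_toFinset l]
  exact (List.toFinset_card_of_nodup (pv_uniq_nodup l)).symm

lemma pv_common_length (f b : List Int) :
    ((pvUniq f).filter (fun x => x ∈ b)).length = (f.toFinset ∩ b.toFinset).card := by
  have hnd : ((pvUniq f).filter (fun x => x ∈ b)).Nodup :=
    (pv_uniq_nodup f).filter _
  rw [← List.toFinset_card_of_nodup hnd]
  congr 1
  ext y
  simp only [List.mem_toFinset, Finset.mem_inter, List.mem_filter, decide_eq_true_eq]
  constructor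
  · rintro ⟨h1, h2⟩
    refine ⟨?_, h2⟩
    rw [← List.mem_toFinset, pv_uniq_toFinset, List.mem_toFinset] at h1; exact h1
  · rintro ⟨h1, h2⟩
    refine ⟨?_, h2⟩
    rw [← List.mem_toFinset, pv_uniq_toFinset, List.mem_toFinset]; exact h1

-- value of A in Finset terms
lemma pv_A_char (f b : List Int) :
    compare_content_lists f b
      = ((f.toFinset \ b.toFinset).card : Int) + ((b.toFinset \ f.toFinset).card : Int) := by
  unfold compare_content_lists
  rw [pv_loopA b f [] 0]
  simp only []
  rw [pv_loopA f b ([] ++ f) (0 + _)]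
  have h1 : b.toFinset ∪ ([] : List Int).toFinset = b.toFinset := by simp
  have h2 : f.toFinset ∪ (([] : List Int) ++ f).toFinset = f.toFinset := by simp
  simp only [h1, h2]
  ring

-- value of B in Finset terms
lemma pv_B_char (f b : List Int) :
    compare_content_lists_alt f b
      = (f.toFinset.card : Int) + (b.toFinset.card : Int)
        - 2 * ((f.toFinset ∩ b.toFinset).card : Int) := by
  unfold compare_content_lists_alt
  rw [pv_uniq_length f, pv_uniq_length b, pv_common_length f b]


-- ===== VERDICT (by name: the statement is the Claim_ definition above) =====
theorem compare_content_lists_spec : Claim_equal_compare_content_lists := by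
  intro f b _
  unfold Spec_compare_content_lists
  rw [pv_A_char, pv_B_char]
  have h1 : (f.toFinset ∩ b.toFinset).card + (f.toFinset \ b.toFinset).card = f.toFinset.card :=
    Finset.card_inter_add_card_sdiff _ _
  have h2 : (b.toFinset ∩ f.toFinset).card + (b.toFinset \ f.toFinset).card = b.toFinset.card :=
    Finset.card_inter_add_card_sdiff _ _
  have h3 : (f.toFinset ∩ b.toFinset).card = (b.toFinset ∩ f.toFinset).card := by
    rw [Finset.inter_comm]
  omega
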